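-- pv_equiv track=rewrite | github.com/amsclark/ncriat | auxfuncs.py | getCountyName
-- ===== SOURCE A (Python) =====
-- def getCountyName(lookup_number):
--   county_numbers_dict = {"Adams" : "14",
--   "Antelope" : "26",
--   "Arthur" : "91",
--   "Banner" : "85",
--   "Blaine" : "86",
--   "Boone" : "23",
--   "Box Butte" : "65",
--   "Boyd" : "63",
--   "Brown" : "75",
--   "Buffalo" : "09",
--   "Burt" : "31",
--   "Butler" : "25",
--   "Cass" : "20",
--   "Cedar" : "13",
--   "Chase" : "72",
--   "Cherry" : "66",
--   "Cheyenne" : "39",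
--   "Clay" : "30",
--   "Colfax" : "43",
--   "Cuming" : "24",
--   "Custer" : "04",
--   "Dakota" : "70",
--   "Dawes" : "69",
--   "Dawson" : "18",
--   "Deuel" : "78",
--   "Dixon" : "35",
--   "Dodge" : "05",
--   "Douglas" : "01",
--   "Dundy" : "76",
--   "Fillmore" : "34",
--   "Franklin" : "50",
--   "Frontier" : "60",
--   "Furnas" : "38",
--   "Gage" : "03",
--   "Garden" : "77",
--   "Garfield" : "83",
--   "Gosper" : "73",
--   "Grant" : "92",
--   "Greeley" : "62",
--   "Hall" : "08",
--   "Hamilton" : "28",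
--   "Harlan" : "51",
--   "Hayes" : "79",
--   "Hitchcock" : "67",
--   "Holt" : "36",
--   "Hooker" : "93",
--   "Howard" : "49",
--   "Jefferson" : "33",
--   "Johnson" : "57",
--   "Kearney" : "52",
--   "Keith" : "68",
--   "Keya Paha" : "82",
--   "Kimball" : "71",
--   "Knox" : "12",
--   "Lancaster" : "02",
--   "Lincoln" : "15",
--   "Logan" : "87",
--   "Loup" : "88",
--   "Madison" : "07",
--   "McPherson" : "90",
--   "Merrick" : "46",
--   "Morrill" : "64",
--   "Nance" : "58",
--   "Nemaha" : "44",
--   "Nuckolls" : "42",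
--   "Otoe" : "11",
--   "Pawnee" : "54",
--   "Perkins" : "74",
--   "Phelps" : "37",
--   "Pierce" : "40",
--   "Platte" : "10",
--   "Polk" : "41",
--   "Red Willow" : "48",
--   "Richardson" : "19",
--   "Rock" : "81",
--   "Saline" : "22",
--   "Sarpy" : "59",
--   "Saunders" : "06",
--   "Scotts Bluff" : "21",
--   "Seward" : "16",
--   "Sheridan" : "61",
--   "Sherman" : "56",
--   "Sioux" : "80",
--   "Stanton" : "53",
--   "Thayer" : "32",
--   "Thomas" : "89",
--   "Thurston" : "55",
--   "Valley" : "47",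
--   "Washington" : "29",
--   "Wayne" : "27",
--   "Webster" : "45",
--   "Wheeler" : "84",
--   "York" : "17"}
--   for key, value in county_numbers_dict.items():
--     if lookup_number == value:
--       return key
--   return "no such county"
-- ===== SOURCE B (Python) =====
-- def getCountyName(lookup_number):
--   # County numbers are exactly the two-digit strings "01".."93"; decode the
--   # string arithmetically and index a tuple of names ordered by county number.
--   NAMES = (
--     'Douglas', 'Lancaster', 'Gage', 'Custer', 'Dodge', 'Saunders',
--     'Madison', 'Hall', 'Buffalo', 'Platte', 'Otoe', 'Knox',
--     'Cedar', 'Adams', 'Lincoln', 'Seward', 'York', 'Dawson',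
--     'Richardson', 'Cass', 'Scotts Bluff', 'Saline', 'Boone', 'Cuming',
--     'Butler', 'Antelope', 'Wayne', 'Hamilton', 'Washington', 'Clay',
--     'Burt', 'Thayer', 'Jefferson', 'Fillmore', 'Dixon', 'Holt',
--     'Phelps', 'Furnas', 'Cheyenne', 'Pierce', 'Polk', 'Nuckolls',
--     'Colfax', 'Nemaha', 'Webster', 'Merrick', 'Valley', 'Red Willow',
--     'Howard', 'Franklin', 'Harlan', 'Kearney', 'Stanton', 'Pawnee',
--     'Thurston', 'Sherman', 'Johnson', 'Nance', 'Sarpy', 'Frontier',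
--     'Sheridan', 'Greeley', 'Boyd', 'Morrill', 'Box Butte', 'Cherry',
--     'Hitchcock', 'Keith', 'Dawes', 'Dakota', 'Kimball', 'Chase',
--     'Gosper', 'Perkins', 'Brown', 'Dundy', 'Garden', 'Deuel',
--     'Hayes', 'Sioux', 'Rock', 'Keya Paha', 'Garfield', 'Wheeler',
--     'Banner', 'Blaine', 'Logan', 'Loup', 'Thomas', 'McPherson',
--     'Arthur', 'Grant', 'Hooker',
--   )
--   if len(lookup_number) == 2:
--     d1 = ord(lookup_number[0]) - 48
--     d2 = ord(lookup_number[1]) - 48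
--     if 0 <= d1 <= 9 and 0 <= d2 <= 9:
--       n = 10 * d1 + d2
--       if 1 <= n <= 93:
--         return NAMES[n - 1]
--   return "no such county"
-- ===== Notes on version B (the rewrite author's own statement) =====
-- stated objective: alternative
-- what changed: Replaced the linear scan over the name->number dict's items with arithmetic decoding of the two-digit string (length/digit check, n = 10*d1+d2) and a direct index into a tuple of the 93 names ordered by county number; no dict and no scan remain.
import Mathlib
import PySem

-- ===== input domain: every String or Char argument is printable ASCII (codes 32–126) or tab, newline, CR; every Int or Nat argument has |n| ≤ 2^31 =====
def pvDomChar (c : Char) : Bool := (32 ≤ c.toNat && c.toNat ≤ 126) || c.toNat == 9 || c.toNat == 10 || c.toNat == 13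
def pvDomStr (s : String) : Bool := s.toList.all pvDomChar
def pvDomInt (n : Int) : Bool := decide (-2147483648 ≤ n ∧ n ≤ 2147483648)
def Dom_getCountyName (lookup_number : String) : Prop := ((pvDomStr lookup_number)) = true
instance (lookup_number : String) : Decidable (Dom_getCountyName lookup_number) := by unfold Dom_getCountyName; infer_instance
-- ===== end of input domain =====

-- B replaces A's linear scan over the name→number dict's items by arithmetic decoding of
-- the two-digit string and a direct index into the 93 names ordered by county number
-- (alternative algorithm, same result everywhere).

-- ===== PORT A =====
-- A's county dict in insertion order (name, number); A iterates its .items().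
def countyPairsA : List (String × String) := [("Adams", "14"), ("Antelope", "26"), ("Arthur", "91"), ("Banner", "85"), ("Blaine", "86"), ("Boone", "23"), ("Box Butte", "65"), ("Boyd", "63"), ("Brown", "75"), ("Buffalo", "09"), ("Burt", "31"), ("Butler", "25"), ("Cass", "20"), ("Cedar", "13"), ("Chase", "72"), ("Cherry", "66"), ("Cheyenne", "39"), ("Clay", "30"), ("Colfax", "43"), ("Cuming", "24"), ("Custer", "04"), ("Dakota", "70"), ("Dawes", "69"), ("Dawson", "18"), ("Deuel", "78"), ("Dixon", "35"), ("Dodge", "05"), ("Douglas", "01"), ("Dundy", "76"), ("Fillmore", "34"), ("Franklin", "50"), ("Frontier", "60"), ("Furnas", "38"), ("Gage", "03"), ("Garden", "77"), ("Garfield", "83"), ("Gosper", "73"), ("Grant", "92"), ("Greeley", "62"), ("Hall", "08"), ("Hamilton", "28"), ("Harlan", "51"), ("Hayes", "79"), ("Hitchcock", "67"), ("Holt", "36"), ("Hooker", "93"), ("Howard", "49"), ("Jefferson", "33"), ("Johnson", "57"), ("Kearney", "52"), ("Keith", "68"), ("Keya Paha", "82"), ("Kimball", "71"), ("Knox", "12"),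 ("Lancaster", "02"), ("Lincoln", "15"), ("Logan", "87"), ("Loup", "88"), ("Madison", "07"), ("McPherson", "90"), ("Merrick", "46"), ("Morrill", "64"), ("Nance", "58"), ("Nemaha", "44"), ("Nuckolls", "42"), ("Otoe", "11"), ("Pawnee", "54"), ("Perkins", "74"), ("Phelps", "37"), ("Pierce", "40"), ("Platte", "10"), ("Polk", "41"), ("Red Willow", "48"), ("Richardson", "19"), ("Rock", "81"), ("Saline", "22"), ("Sarpy", "59"), ("Saunders", "06"), ("Scotts Bluff", "21"), ("Seward", "16"), ("Sheridan", "61"), ("Sherman", "56"), ("Sioux", "80"), ("Stanton", "53"), ("Thayer", "32"), ("Thomas", "89"), ("Thurston", "55"), ("Valley", "47"), ("Washington", "29"), ("Wayne", "27"), ("Webster", "45"), ("Wheeler", "84"), ("York", "17")]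

-- A's loop: first (key, value) with value == lookup, returning key; else the sentinel
-- (string equality compared on the char lists, per the PySem convention).
def scanItems (lookup : List Char) : List (String × String) → String
  | [] => "no such county"
  | (key, value) :: rest =>
      if lookup == value.toList then key else scanItems lookup rest

def getCountyName (lookup_number : String) : String :=
  scanItems lookup_number.toList countyPairsA

-- ===== PORT B =====
-- B's NAMES tuple: pvNames[k] is the county with number k+1 (the numbers are exactly "01".."93").
def pvNames : List String := ["Douglas", "Lancaster", "Gage", "Custer", "Dodge", "Saunders", "Madison", "Hall", "Buffalo", "Platte", "Otoe", "Knox", "Cedar", "Adams", "Lincoln", "Seward", "York", "Dawson", "Richardson", "Cass", "Scotts Bluff", "Saline", "Boone", "Cuming", "Butler", "Antelope", "Wayne", "Hamilton", "Washington", "Clay", "Burt", "Thayer", "Jefferson", "Fillmore", "Dixon", "Holt", "Phelps", "Furnas", "Cheyenne", "Pierce", "Polk", "Nuckolls", "Colfax", "Nemaha", "Webster", "Merrick", "Valley", "Red Willow", "Howard", "Franklin", "Harlan", "Kearney", "Stanton", "Pawnee", "Thurston", "Sherman", "Johnson", "Nance", "Sarpy", "Frontier", "Sheridan", "Greeley",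 "Boyd", "Morrill", "Box Butte", "Cherry", "Hitchcock", "Keith", "Dawes", "Dakota", "Kimball", "Chase", "Gosper", "Perkins", "Brown", "Dundy", "Garden", "Deuel", "Hayes", "Sioux", "Rock", "Keya Paha", "Garfield", "Wheeler", "Banner", "Blaine", "Logan", "Loup", "Thomas", "McPherson", "Arthur", "Grant", "Hooker"]

-- B's body on the char list: len == 2, decode the two digits, index NAMES.
def decodeLookup (l : List Char) : String :=
  match l with
  | [c1, c2] =>                                         -- len(lookup_number) == 2 and its two chars
      let d1 : Int := (c1.toNat : Int) - 48             -- ord(lookup_number[0]) - 48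
      let d2 : Int := (c2.toNat : Int) - 48
      if 0 ≤ d1 ∧ d1 ≤ 9 ∧ 0 ≤ d2 ∧ d2 ≤ 9 then
        let n : Int := 10 * d1 + d2
        if 1 ≤ n ∧ n ≤ 93 then
          pvNames.getD (n - 1).toNat "no such county"   -- NAMES[n - 1]; the guard puts the index in range
        else "no such county"
      else "no such county"
  | _ => "no such county"

def getCountyName_alt (lookup_number : String) : String :=
  decodeLookup lookup_number.toList

-- ===== PRECONDITION & SPEC =====
def Spec_getCountyName (lookup_number : String) (out : String) : Prop := out = getCountyName_alt lookup_number
instance (lookup_number : String) (out : String) : Decidable (Spec_getCountyName lookup_number out) := by unfold Spec_getCountyName; infer_instance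

-- ===== CLAIM (what is proved, stated in full; the proofs are below) =====
def Claim_equal_getCountyName : Prop := ∀ (lookup_number : String), Dom_getCountyName lookup_number → Spec_getCountyName lookup_number (getCountyName lookup_number)

-- ===== LEMMAS AND PROOFS =====
-- If the lookup differs from every value in the list, the scan returns the sentinel.
theorem scan_sentinel (cs : List Char) (l : List (String × String))
    (h : ∀ p ∈ l, cs ≠ p.2.toList) : scanItems cs l = "no such county" := by
  induction l with
  | nil => rfl
  | cons p rest ih =>
      obtain ⟨k, v⟩ := p
      have hv : cs ≠ v.toList := h (k, v) (List.mem_cons_self ..)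
      show (if cs == v.toList then k else scanItems cs rest) = _
      rw [if_neg (by simp only [beq_iff_eq]; exact hv)]
      exact ih fun q hq => h q (List.mem_cons_of_mem _ hq)

-- Every value in A's dict is a string of exactly two decimal digits.
theorem valuesA_two_digits :
    ∀ p ∈ countyPairsA, p.2.toList.length = 2 ∧
      ∀ c ∈ p.2.toList, 48 ≤ c.toNat ∧ c.toNat ≤ 57 := by
  have h : countyPairsA.all (fun p => p.2.toList.length == 2 &&
      p.2.toList.all (fun c => decide (48 ≤ c.toNat) && decide (c.toNat ≤ 57))) = true := by decide
  simpa [List.all_eq_true] using h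

-- The finite core: on every two-digit char list the two ports' bodies agree.
set_option maxRecDepth 10000 in
theorem digit_core : ∀ a b : Fin 10,
    scanItems [Char.ofNat (48 + a.val), Char.ofNat (48 + b.val)] countyPairsA =
    decodeLookup [Char.ofNat (48 + a.val), Char.ofNat (48 + b.val)] := by decide

-- ===== VERDICT (by name: the statement is the Claim_ definition above) =====
theorem getCountyName_spec : Claim_equal_getCountyName := by
  intro s _
  unfold Spec_getCountyName getCountyName getCountyName_alt
  generalize s.toList = l
  match l with
  | [] => decide
  | [c] =>
      rw [scan_sentinel]
      · rfl
      · intro p hp h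
        have hlen := (valuesA_two_digits p hp).1
        rw [← h] at hlen
        simp at hlen
  | c1 :: c2 :: c3 :: t =>
      rw [scan_sentinel]
      · rfl
      · intro p hp h
        have hlen := (valuesA_two_digits p hp).1
        rw [← h] at hlen
        simp at hlen
  | [c1, c2] =>
      by_cases hd : (48 ≤ c1.toNat ∧ c1.toNat ≤ 57) ∧ (48 ≤ c2.toNat ∧ c2.toNat ≤ 57)
      · obtain ⟨⟨h1l, h1u⟩, h2l, h2u⟩ := hd
        have e1 : c1 = Char.ofNat (48 + (⟨c1.toNat - 48, by omega⟩ : Fin 10).val) := by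
          conv_lhs => rw [← Char.ofNat_toNat c1]
          congr 1
          show c1.toNat = 48 + (c1.toNat - 48)
          omega
        have e2 : c2 = Char.ofNat (48 + (⟨c2.toNat - 48, by omega⟩ : Fin 10).val) := by
          conv_lhs => rw [← Char.ofNat_toNat c2]
          congr 1
          show c2.toNat = 48 + (c2.toNat - 48)
          omega
        rw [e1, e2]
        exact digit_core _ _
      · have halt : decodeLookup [c1, c2] = "no such county" := by
          rw [decodeLookup]
          rw [if_neg (by omega)]
        rw [halt]
        apply scan_sentinel
        intro p hp h
        have hdig := (valuesA_two_digits p hp).2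
        have d1 := hdig c1 (by rw [← h]; simp)
        have d2 := hdig c2 (by rw [← h]; simp)
        exact hd ⟨d1, d2⟩
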